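-- pv_equiv track=rewrite | github.com/Klaudia1303/student_code_analysis | Progetto-tirocinio2024/data/student_data/2065747_Perillo/LabPython08/A_Ex4.py | A_Ex4
-- ===== SOURCE A (Python) =====
-- def A_Ex4(l):
--     l2=l.copy()
--     a=0
--     k=0
--     risultato=set()
--     for i in l2:
--         a=l.count(i)
--         b=(i,a)
--         if a>0:
--             risultato.add(b)
--         while k<l.count(i):
--             l.remove(i)
--     return(risultato)
-- ===== SOURCE B (Python) =====
-- def A_Ex4(l):
--     # One-pass dict counter instead of repeated count/remove scans.
--     # Like A, this empties the caller's list l (A's side effect, reproduced).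
--     counts = {}
--     for x in l:
--         counts[x] = counts.get(x, 0) + 1
--     l.clear()
--     return set(counts.items())
-- ===== Notes on version B (the rewrite author's own statement) =====
-- stated objective: faster
-- what changed: Replaces A's repeated l.count scans and element-by-element l.remove loop with a single pass that builds a dict counter, then returns its items as a set (reproducing A's side effect of emptying l with one clear()).
import Mathlib
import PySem

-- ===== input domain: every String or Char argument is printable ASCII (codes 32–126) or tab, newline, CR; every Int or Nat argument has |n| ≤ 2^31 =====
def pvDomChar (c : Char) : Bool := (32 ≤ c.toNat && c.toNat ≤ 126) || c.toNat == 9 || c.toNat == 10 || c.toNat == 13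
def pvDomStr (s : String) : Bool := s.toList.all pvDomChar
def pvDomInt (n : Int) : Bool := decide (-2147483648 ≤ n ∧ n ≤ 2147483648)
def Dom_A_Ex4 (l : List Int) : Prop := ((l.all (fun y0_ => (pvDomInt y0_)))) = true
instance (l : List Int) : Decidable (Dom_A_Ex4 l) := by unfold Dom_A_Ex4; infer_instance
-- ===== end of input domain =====

-- B replaces A's repeated count/remove scans with one dict-counter pass (measured faster);
-- equivalence is about the RETURN value — both Pythons also empty the argument list l in place.

-- ===== PORT A =====
-- the inner 'while k < l.count(i): l.remove(i)' loop (k is always 0 in A, kept as a parameter)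
def pyWhileRemove (k i : Int) (lc : List Int) : List Int :=
  if _h : k < (PySem.List.count lc i : Int) then
    match _e : PySem.List.remove? lc i with
    | some lc' => pyWhileRemove k i lc'
    | none => lc
  else lc
termination_by lc.length
decreasing_by
  have hm : i ∈ lc := by
    by_contra hni
    rw [(PySem.List.remove?_eq_none_iff lc i).mpr hni] at _e
    exact absurd _e (by simp)
  rw [PySem.List.remove?_eq_some_erase lc i hm] at _e
  have he : lc' = lc.erase i := (Option.some.inj _e).symm
  subst he
  have h1 := List.length_erase_of_mem hm
  have h2 : 0 < lc.length := List.length_pos_of_mem hm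
  omega

-- one iteration of A's 'for i in l2' body on the state (l, k, risultato)
def stepA (st : List Int × Int × PySem.Set (Int × Int)) (i : Int) :
    List Int × Int × PySem.Set (Int × Int) :=
  let lc := st.1
  let k := st.2.1
  let ris := st.2.2
  let a : Int := (PySem.List.count lc i : Int)
  let b := (i, a)
  let ris' := if a > 0 then PySem.Set.add ris b else ris
  let lc' := pyWhileRemove k i lc
  (lc', k, ris')

def A_Ex4 (l : List Int) : List (Int × Int) :=
  let l2 := l
  (l2.foldl stepA (l, (0 : Int), (PySem.Set.empty : PySem.Set (Int × Int)))).2.2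

-- ===== PORT B =====
def A_Ex4_alt (l : List Int) : List (Int × Int) :=
  let counts := l.foldl (fun (d : PySem.Dict Int Int) x => d.insert x (d.getD x 0 + 1))
    (PySem.Dict.empty : PySem.Dict Int Int)
  PySem.Set.ofList counts.items

-- ===== PRECONDITION & SPEC =====
def Spec_A_Ex4 (l : List Int) (out : List (Int × Int)) : Prop := out = A_Ex4_alt l
instance (l : List Int) (out : List (Int × Int)) : Decidable (Spec_A_Ex4 l out) := by unfold Spec_A_Ex4; infer_instance

-- ===== CLAIM (what is proved, stated in full; the proofs are below) =====
def Claim_equal_A_Ex4 : Prop := ∀ (l : List Int), Dom_A_Ex4 l → Spec_A_Ex4 l (A_Ex4 l)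

-- ===== LEMMAS AND PROOFS =====

-- B's value: the counter's items are the distinct values with their counts, in first-occurrence order
lemma alt_eq (l : List Int) :
    A_Ex4_alt l = (PySem.Set.ofList l).map (fun v => (v, (l.count v : Int))) := by
  show PySem.Set.ofList (List.foldl _ PySem.Dict.empty l).items = _
  rw [PySem.Dict.foldl_insert_getD_add_one_eq_counter, PySem.Dict.items_counter]
  refine PySem.Set.ofList_eq_self_of_nodup _ ?_
  exact (PySem.Set.nodup_ofList l).map (fun a b h => by simpa using (Prod.mk.injEq _ _ _ _ ▸ h).1)

lemma filter_erase_ne (lc : List Int) (i : Int) :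
    (lc.erase i).filter (fun x => !(x == i)) = lc.filter (fun x => !(x == i)) := by
  induction lc with
  | nil => simp
  | cons x xs ih =>
    by_cases hx : x = i
    · subst hx; simp [List.erase_cons_head]
    · rw [List.erase_cons_tail (by simp [hx])]
      simp [hx, ih]

-- A's inner while loop removes every occurrence of i
lemma pyWhileRemove_zero (i : Int) (lc : List Int) :
    pyWhileRemove 0 i lc = lc.filter (fun x => !(x == i)) := by
  fun_induction pyWhileRemove 0 i lc with
  | case1 lc _h lc' _e ih =>
    have hm : i ∈ lc := by
      by_contra hni
      rw [(PySem.List.remove?_eq_none_iff lc i).mpr hni] at _e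
      exact absurd _e (by simp)
    rw [PySem.List.remove?_eq_some_erase lc i hm] at _e
    have he : lc' = lc.erase i := (Option.some.inj _e).symm
    subst he
    rw [ih, filter_erase_ne]
  | case2 lc _h _e =>
    exfalso
    have hm : i ∈ lc := by
      have : 0 < PySem.List.count lc i := by exact_mod_cast _h
      simpa [PySem.List.count, List.count_pos_iff] using this
    rw [PySem.List.remove?_eq_some_erase lc i hm] at _e
    exact absurd _e (by simp)
  | case3 lc _h =>
    have hni : i ∉ lc := by
      simp only [not_lt] at _h
      have : PySem.List.count lc i = 0 := by omega
      simpa [PySem.List.count, List.count_eq_zero] using this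
    exact (List.filter_eq_self.mpr (fun a ha => by simp; rintro rfl; exact hni ha)).symm

-- Set.ofList commutes with filter
lemma ofList_filter (p : Int → Bool) (xs : List Int) :
    PySem.Set.ofList (xs.filter p) = (PySem.Set.ofList xs).filter p := by
  induction xs with
  | nil => simp [PySem.Set.ofList]
  | cons x xs ih =>
    rw [PySem.Set.ofList_cons]
    by_cases hx : p x = true
    · rw [List.filter_cons_of_pos hx, PySem.Set.ofList_cons, ih]
      simp only [PySem.Set.discard, List.filter_cons_of_pos hx, List.filter_filter]
      congr 1
      exact List.filter_congr (fun a _ => by rw [Bool.and_comm])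
    · rw [List.filter_cons_of_neg hx, ih]
      simp only [PySem.Set.discard, List.filter_cons_of_neg hx, List.filter_filter]
      refine (List.filter_congr (fun a _ => ?_)).symm
      by_cases ha : a = x
      · subst ha; simp [hx]
      · simp [ha]

-- the invariant of A's main loop: lc is l with the already-seen values removed,
-- and the emitted pairs append in first-occurrence order
lemma loopA (l : List Int) (rest : List Int) :
    ∀ (seen : List Int) (ris : PySem.Set (Int × Int)),
    (∀ x ∈ rest, x ∈ l) →
    (∀ v, v ∉ seen → (v, (l.count v : Int)) ∉ ris) →
    (rest.foldl stepA (l.filter (fun x => decide (x ∉ seen)), (0 : Int), ris)).2.2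
    = ris ++ (PySem.Set.ofList (rest.filter (fun x => decide (x ∉ seen)))).map
        (fun v => (v, (l.count v : Int))) := by
  induction rest with
  | nil => intro seen ris _ _; simp [PySem.Set.ofList]
  | cons i rest' ih =>
    intro seen ris h1 h2
    rw [List.foldl_cons]
    by_cases hi : i ∈ seen
    · -- i was already processed: count is 0, nothing happens
      have hcnt : PySem.List.count (l.filter (fun x => decide (x ∉ seen))) i = 0 := by
        simp [PySem.List.count_eq, List.count_eq_zero, hi]
      have hstep : stepA (l.filter (fun x => decide (x ∉ seen)), (0 : Int), ris) i
          = (l.filter (fun x => decide (x ∉ seen)), (0 : Int), ris) := by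
        simp only [stepA, hcnt, pyWhileRemove_zero, Nat.cast_zero, gt_iff_lt, lt_irrefl, if_false]
        refine Prod.ext ?_ rfl
        exact List.filter_eq_self.mpr (fun a ha => by
          simp only [List.mem_filter, decide_eq_true_eq] at ha
          simp; rintro rfl; exact ha.2 hi)
      rw [hstep, ih seen ris (fun x hx => h1 x (by simp [hx])) h2,
        List.filter_cons_of_neg (by simp [hi])]
    · -- first occurrence of the value i
      have hil : i ∈ l := h1 i (by simp)
      have hcnt : PySem.List.count (l.filter (fun x => decide (x ∉ seen))) i = l.count i := by
        simp only [PySem.List.count_eq]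
        exact List.count_filter (by simp [hi])
      have hpos : (0 : Int) < (l.count i : Int) := by
        exact_mod_cast List.count_pos_iff.mpr hil
      have hfil : (l.filter (fun x => decide (x ∉ seen))).filter (fun x => !(x == i))
          = l.filter (fun x => decide (x ∉ i :: seen)) := by
        rw [List.filter_filter]
        exact List.filter_congr (fun a _ => by
          by_cases ha : a = i
          · subst ha; simp
          · simp [ha])
      have hstep : stepA (l.filter (fun x => decide (x ∉ seen)), (0 : Int), ris) i
          = (l.filter (fun x => decide (x ∉ i :: seen)), (0 : Int),
             ris ++ [(i, (l.count i : Int))]) := by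
        simp only [stepA, hcnt, pyWhileRemove_zero, hfil]
        rw [if_pos hpos, PySem.Set.add_of_not_mem (h2 i hi)]
      rw [hstep, ih (i :: seen) _ (fun x hx => h1 x (by simp [hx]))
        (fun v hv => by
          simp only [List.mem_cons, not_or] at hv
          simp only [List.mem_append, List.mem_singleton, Prod.mk.injEq, not_or]
          exact ⟨h2 v hv.2, fun h => absurd h.1 hv.1⟩)]
      rw [List.filter_cons_of_pos (by simp [hi]), PySem.Set.ofList_cons]
      simp only [PySem.Set.discard]
      rw [← ofList_filter, List.filter_filter]
      have hfil2 : (rest'.filter fun a => !(a == i) && decide (a ∉ seen))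
          = rest'.filter (fun x => decide (x ∉ i :: seen)) :=
        List.filter_congr (fun a _ => by
          by_cases ha : a = i
          · subst ha; simp
          · simp [ha])
      rw [hfil2]
      simp

-- ===== VERDICT (by name: the statement is the Claim_ definition above) =====
theorem A_Ex4_spec : Claim_equal_A_Ex4 := by
  intro l _
  unfold Spec_A_Ex4
  rw [alt_eq]
  show (l.foldl stepA (l, (0 : Int), (PySem.Set.empty : PySem.Set (Int × Int)))).2.2 = _
  have h0 : l = l.filter (fun x => decide (x ∉ ([] : List Int))) := by simp
  calc (l.foldl stepA (l, (0 : Int), (PySem.Set.empty : PySem.Set (Int × Int)))).2.2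
      = (l.foldl stepA (l.filter (fun x => decide (x ∉ ([] : List Int))), (0 : Int),
          ([] : PySem.Set (Int × Int)))).2.2 := by rw [← h0]; rfl
    _ = _ := by
        rw [loopA l l [] [] (fun x hx => hx) (by simp)]
        simp
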